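-- pv_equiv track=rewrite | github.com/Aaz0og/NSI | PROJETS/PROJET V2/Niels Romain 30-12.py | carreslistedescoordonnes
-- ===== SOURCE A (Python) =====
-- def carreslistedescoordonnes(lstx,lsty):
--     coordx = list()
--     coordy = list()
--     for lentx in range(len(lstx)):
--         try:
--             coordx.append(lstx[lentx])
--             coordx.append(lstx[lentx+1])
--         except IndexError:
--             coordx.append(lstx[lentx])
--             #coordx.append(lstx[lentx])
--     for lenty in range(len(lsty)):
--         try:
--             coordy.append(lsty[lenty])
--             coordy.append(lsty[lenty+1])
--         except IndexError:
--             coordy.append(lsty[lenty])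
--             #coordy.append(lsty[lenty])
--
--     return coordx, coordy
-- ===== SOURCE B (Python) =====
-- def carreslistedescoordonnes(lstx, lsty):
--     def doubled(lst):
--         d = [v for x in lst for v in (x, x)]
--         return d[1:] + d[-1:]
--     return doubled(lstx), doubled(lsty)
-- ===== Notes on version B (the rewrite author's own statement) =====
-- stated objective: idiomatic
-- what changed: Instead of an index loop pairing each element with its successor via try/except IndexError, B first duplicates every element in one comprehension and then shifts the whole doubled list by one with slices (d[1:] + d[-1:]).
import Mathlib
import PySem

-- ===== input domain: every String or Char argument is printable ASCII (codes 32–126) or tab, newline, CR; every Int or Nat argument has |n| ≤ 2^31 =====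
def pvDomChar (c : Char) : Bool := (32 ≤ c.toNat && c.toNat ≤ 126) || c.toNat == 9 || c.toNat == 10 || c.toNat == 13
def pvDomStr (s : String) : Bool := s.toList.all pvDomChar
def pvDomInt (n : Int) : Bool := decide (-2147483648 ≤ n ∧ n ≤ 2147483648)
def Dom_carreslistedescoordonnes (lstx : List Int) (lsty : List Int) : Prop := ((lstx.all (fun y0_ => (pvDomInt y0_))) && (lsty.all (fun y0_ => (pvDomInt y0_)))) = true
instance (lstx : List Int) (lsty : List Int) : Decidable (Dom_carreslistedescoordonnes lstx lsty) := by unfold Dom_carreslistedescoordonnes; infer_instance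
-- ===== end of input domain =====

-- B replaces A's try/except index loop by two staged passes: duplicate every element, then shift the doubled list by one with slices (idiomatic; same O(n) cost).

-- ===== PORT A =====
-- one 'for lent in range(len(lst))' loop with try/except IndexError
def pvLoopA (lst : List Int) : List Int :=
  (PySem.List.pyRange 0 (lst.length : Int) 1).foldl
    (fun acc i =>
      let acc1 := acc ++ [PySem.List.pyGetD lst i 0]     -- coord.append(lst[lent])  (always in range)
      match PySem.List.pyGet? lst (i + 1) with
      | some v => acc1 ++ [v]                            -- coord.append(lst[lent+1])
      | none   => acc1 ++ [PySem.List.pyGetD lst i 0])   -- except IndexError: coord.append(lst[lent])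
    []

def carreslistedescoordonnes (lstx : List Int) (lsty : List Int) : List Int × List Int :=
  (pvLoopA lstx, pvLoopA lsty)

-- ===== PORT B =====
-- d = [v for x in lst for v in (x, x)]
def pvDup (lst : List Int) : List Int :=
  lst.flatMap (fun x => [x, x])

-- d[1:] + d[-1:]
def pvDoubled (lst : List Int) : List Int :=
  let d := pvDup lst
  PySem.List.slice d (some 1) none ++ PySem.List.slice d (some (-1)) none

def carreslistedescoordonnes_alt (lstx : List Int) (lsty : List Int) : List Int × List Int :=
  (pvDoubled lstx, pvDoubled lsty)

-- ===== PRECONDITION & SPEC =====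
def Spec_carreslistedescoordonnes (lstx : List Int) (lsty : List Int) (out : List Int × List Int) : Prop := out = carreslistedescoordonnes_alt lstx lsty
instance (lstx : List Int) (lsty : List Int) (out : List Int × List Int) : Decidable (Spec_carreslistedescoordonnes lstx lsty out) := by unfold Spec_carreslistedescoordonnes; infer_instance

-- ===== CLAIM =====
def Claim_equal_carreslistedescoordonnes : Prop := ∀ (lstx : List Int) (lsty : List Int), Dom_carreslistedescoordonnes lstx lsty → Spec_carreslistedescoordonnes lstx lsty (carreslistedescoordonnes lstx lsty)

-- ===== LEMMAS AND PROOFS =====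

-- the list A appends at loop index k, as a function of a Nat index
def pvBody (xs : List Int) (k : Nat) : List Int :=
  match xs[k + 1]? with
  | some v => [xs.getD k 0, v]
  | none   => [xs.getD k 0, xs.getD k 0]

set_option maxHeartbeats 1000000 in
theorem pvLoopA_eq_flatMap (lst : List Int) :
    pvLoopA lst = (List.range lst.length).flatMap (pvBody lst) := by
  have hstep : (fun (acc : List Int) (i : Int) =>
      let acc1 := acc ++ [PySem.List.pyGetD lst i 0]
      match PySem.List.pyGet? lst (i + 1) with
      | some v => acc1 ++ [v]
      | none   => acc1 ++ [PySem.List.pyGetD lst i 0]) =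
      fun acc i => acc ++ (match PySem.List.pyGet? lst (i + 1) with
      | some v => [PySem.List.pyGetD lst i 0, v]
      | none   => [PySem.List.pyGetD lst i 0, PySem.List.pyGetD lst i 0]) := by
    funext acc i
    cases h : PySem.List.pyGet? lst (i + 1) <;> simp
  unfold pvLoopA
  rw [hstep, PySem.List.foldl_append_eq_flatMap, PySem.List.pyRange_zero_nat,
    List.flatMap_map]
  simp only [List.nil_append]
  apply List.flatMap_congr
  intro k _
  have h1 : PySem.List.pyGet? lst ((k : Int) + 1) = lst[k + 1]? := by
    rw [show ((k : Int) + 1) = ((k + 1 : Nat) : Int) by push_cast; ring]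
    exact PySem.List.pyGet?_natCast lst (k + 1)
  rw [h1]
  cases h2 : lst[k + 1]? <;> simp [pvBody, pysem, h2]

theorem pvBody_cons (a : Int) (xs : List Int) (k : Nat) :
    pvBody (a :: xs) (k + 1) = pvBody xs k := by
  simp [pvBody]

theorem pvDoubled_cons_cons (a b : Int) (t : List Int) :
    pvDoubled (a :: b :: t) = a :: b :: pvDoubled (b :: t) := by
  simp [pvDoubled, pvDup, PySem.List.slice_from_one, PySem.List.slice_from_neg_one,
    List.drop_succ_cons]

theorem pvMain (xs : List Int) :
    (List.range xs.length).flatMap (pvBody xs) = pvDoubled xs := by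
  induction xs with
  | nil => decide
  | cons a xs ih =>
    cases xs with
    | nil =>
      simp [pvDoubled, pvDup, pvBody,
        PySem.List.slice_from_one, PySem.List.slice_from_neg_one]
    | cons b t =>
      have hlen : (a :: b :: t).length = (b :: t).length + 1 := rfl
      rw [hlen, List.range_succ_eq_map, List.flatMap_cons, List.flatMap_map]
      have h0 : pvBody (a :: b :: t) 0 = [a, b] := by simp [pvBody]
      have hsh : ∀ k ∈ List.range (b :: t).length,
          pvBody (a :: b :: t) (k + 1) = pvBody (b :: t) k := by
        intro k _; exact pvBody_cons a (b :: t) k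
      rw [h0, List.flatMap_congr hsh, ih, pvDoubled_cons_cons]
      simp

-- ===== VERDICT =====
theorem carreslistedescoordonnes_spec : Claim_equal_carreslistedescoordonnes := by
  intro lstx lsty _
  unfold Spec_carreslistedescoordonnes carreslistedescoordonnes carreslistedescoordonnes_alt
  rw [pvLoopA_eq_flatMap, pvLoopA_eq_flatMap, pvMain, pvMain]
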